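-- pv_equiv track=rewrite | github.com/KhoaaaBui/CptS355 | LAB3/Lab3.py | getNumCases
-- ===== SOURCE A (Python) =====
-- def getNumCases(data, counties, months):
--      totalCases = 0
--      for county, log in data.items():
--           # county exist in given counties list
--           if county in counties:
--                for month, cases in log.items():
--                     if month in months:
--                          totalCases += cases
--      return totalCases
-- ===== SOURCE B (Python) =====
-- def getNumCases(data, counties, months):
--     # Query-driven: look up each distinct requested county/month in the dicts
--     # instead of scanning every data entry and filtering.
--     total = 0
--     for county in set(counties):
--         log = data.get(county)
--         if log is not None:
--             for month in set(months):
--                 if month in log: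
--                     total += log[month]
--     return total
-- ===== Notes on version B (the rewrite author's own statement) =====
-- stated objective: faster
-- what changed: B drives the computation from the selection: it iterates the distinct requested counties and months and looks each up by hash in the dicts, instead of scanning every data entry and every inner log entry and testing membership in the request lists.
import Mathlib
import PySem

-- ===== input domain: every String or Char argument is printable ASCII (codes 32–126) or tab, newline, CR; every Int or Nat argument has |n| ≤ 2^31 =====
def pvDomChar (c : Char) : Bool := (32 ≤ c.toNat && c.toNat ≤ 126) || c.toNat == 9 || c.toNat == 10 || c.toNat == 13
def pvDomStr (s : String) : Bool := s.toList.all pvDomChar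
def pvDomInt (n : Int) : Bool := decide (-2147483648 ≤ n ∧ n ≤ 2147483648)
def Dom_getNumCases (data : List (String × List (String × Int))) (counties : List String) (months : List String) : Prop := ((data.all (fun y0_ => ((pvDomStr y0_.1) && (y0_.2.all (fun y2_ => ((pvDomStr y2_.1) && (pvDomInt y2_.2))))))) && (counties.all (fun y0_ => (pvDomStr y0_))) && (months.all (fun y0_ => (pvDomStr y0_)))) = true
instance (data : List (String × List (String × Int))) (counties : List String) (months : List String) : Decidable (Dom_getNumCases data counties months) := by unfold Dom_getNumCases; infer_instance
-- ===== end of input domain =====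

-- B replaces A's data-driven scan-and-filter by query-driven lookups over the
-- distinct requested counties and months (objective: alternative decomposition).

-- ===== PORT A =====
def getNumCases (data : List (String × List (String × Int))) (counties : List String) (months : List String) : Int :=
  data.foldl
    (fun totalCases cl =>
      if counties.contains cl.1 then
        cl.2.foldl (fun acc mc => if months.contains mc.1 then acc + mc.2 else acc) totalCases
      else totalCases) 0

-- ===== PORT B =====
def getNumCases_alt (data : List (String × List (String × Int))) (counties : List String) (months : List String) : Int :=
  (PySem.Set.ofList counties).foldl
    (fun total county =>
      match (PySem.Dict.mk data).get? county with
      | none => total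
      | some log =>
        (PySem.Set.ofList months).foldl
          (fun t month =>
            match (PySem.Dict.mk log).get? month with
            | some c => t + c
            | none => t) total) 0

-- ===== PRECONDITION & SPEC =====
-- Pre_ only states the invariant of the Python dicts the association lists encode
-- (unique keys at both levels); it excludes no input the Python A can receive,
-- since a Python dict cannot hold duplicate keys.
def Pre_getNumCases (data : List (String × List (String × Int))) (counties : List String) (months : List String) : Prop :=
  (data.map Prod.fst).Nodup ∧ ∀ p ∈ data, (p.2.map Prod.fst).Nodup
instance (data : List (String × List (String × Int))) (counties : List String) (months : List String) : Decidable (Pre_getNumCases data counties months) := by unfold Pre_getNumCases; infer_instance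

def pvWitness_getNumCases : (List (String × List (String × Int))) × List String × List String :=
  ([("adams", [("jan", 3), ("feb", 5)]), ("benton", [("jan", 2)])], ["adams", "benton"], ["jan"])

def Spec_getNumCases (data : List (String × List (String × Int))) (counties : List String) (months : List String) (out : Int) : Prop := out = getNumCases_alt data counties months
instance (data : List (String × List (String × Int))) (counties : List String) (months : List String) (out : Int) : Decidable (Spec_getNumCases data counties months out) := by unfold Spec_getNumCases; infer_instance

-- ===== CLAIM (what is proved, stated in full; the proofs are below) =====
def Claim_equal_getNumCases : Prop := ∀ (data : List (String × List (String × Int))) (counties : List String) (months : List String), Dom_getNumCases data counties months → Pre_getNumCases data counties months → Spec_getNumCases data counties months (getNumCases data counties months)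

-- ===== LEMMAS AND PROOFS =====

-- looking up a key absent from an association list yields none
lemma pv_get?_of_not_mem {ν : Type} (l : List (String × ν)) (k : String)
    (hk : k ∉ l.map Prod.fst) : (PySem.Dict.mk l).get? k = none := by
  induction l with
  | nil => simp [PySem.Dict.get?]
  | cons p rest ih =>
    obtain ⟨a, b⟩ := p
    simp only [List.map_cons, List.mem_cons, not_or] at hk
    have hne : (a == k) = false := beq_eq_false_iff_ne.mpr (fun h => hk.1 h.symm)
    rw [PySem.Dict.get?_mk_cons, hne]
    simpa using ih hk.2

-- summing (if k=m then v else g m) over a nodup list, where g k = 0, splits off the hit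
lemma pv_sum_if_hit (D : List String) (hD : D.Nodup) (k : String) (v : Int)
    (g : String → Int) (h0 : g k = 0) :
    (D.map (fun m => if k == m then v else g m)).sum
      = (if D.contains k then v else 0) + (D.map g).sum := by
  induction D with
  | nil => simp
  | cons d ds ih =>
    have hDs := List.Nodup.of_cons hD
    rw [List.map_cons, List.sum_cons, List.map_cons, List.sum_cons, ih hDs, List.contains_cons]
    cases hkd : (k == d) with
    | true =>
      have hEq : k = d := by simpa using hkd
      subst hEq
      have hnot : k ∉ ds := (List.nodup_cons.mp hD).1
      simp [h0, hnot]
    | false =>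
      have hne : d ≠ k := fun h => by simp [h] at hkd
      have hdk : (d == k) = false := beq_eq_false_iff_ne.mpr hne
      simp only [Bool.false_or, if_neg (by simp : ¬ (false = true))]
      ring

-- central lemma: scanning an association list with nodup keys and filtering by
-- membership in sel = looking every distinct element of sel up in the list
lemma pv_assoc_sum {ν : Type} (l : List (String × ν)) (sel : List String) (F : ν → Int)
    (hnd : (l.map Prod.fst).Nodup) :
    (l.map (fun p => if sel.contains p.1 then F p.2 else 0)).sum
      = ((PySem.Set.ofList sel).map
          (fun k => match (PySem.Dict.mk l).get? k with | some v => F v | none => 0)).sum := by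
  induction l with
  | nil =>
    have h : ∀ k, (PySem.Dict.mk ([] : List (String × ν))).get? k = none := by
      intro k; simp [PySem.Dict.get?]
    simp [h]
  | cons p rest ih =>
    obtain ⟨k, v⟩ := p
    simp only [List.map_cons] at hnd
    have hk : k ∉ rest.map Prod.fst := (List.nodup_cons.mp hnd).1
    have hrest := (List.nodup_cons.mp hnd).2
    have hmap : (PySem.Set.ofList sel).map
          (fun m => match (PySem.Dict.mk ((k, v) :: rest)).get? m with | some w => F w | none => 0)
        = (PySem.Set.ofList sel).map
          (fun m => if k == m then F v
                    else (match (PySem.Dict.mk rest).get? m with | some w => F w | none => 0)) := by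
      apply List.map_congr_left
      intro m _
      rw [PySem.Dict.get?_mk_cons]
      by_cases h : (k == m) = true
      · simp [h]
      · simp [h]
    have hhit := pv_sum_if_hit (PySem.Set.ofList sel) (PySem.Set.nodup_ofList sel) k (F v)
        (fun m => match (PySem.Dict.mk rest).get? m with | some w => F w | none => 0)
        (by simp only [pv_get?_of_not_mem rest k hk])
    have hc : List.contains (PySem.Set.ofList sel) k = sel.contains k := by
      by_cases h : k ∈ sel <;> simp [PySem.Set.mem_ofList, h]
    simp only [List.map_cons, List.sum_cons, hmap, ih hrest]
    simp only [] at hhit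
    rw [hhit, hc]

-- A's accumulate-if loop as a sum
lemma pv_foldl_if_add {α : Type} (l : List α) (P : α → Bool) (g : α → Int) (a : Int) :
    l.foldl (fun acc x => if P x then acc + g x else acc) a
      = a + (l.map (fun x => if P x then g x else 0)).sum := by
  induction l generalizing a with
  | nil => simp
  | cons x xs ih =>
    simp only [List.foldl_cons, List.map_cons, List.sum_cons, ih]
    by_cases h : P x = true
    · rw [if_pos h, if_pos h]; ring
    · rw [if_neg h, if_neg h]; ring

-- B's match-accumulate loop as a sum
lemma pv_foldl_opt_add (l : List String) (h : String → Option Int) (a : Int) :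
    l.foldl (fun t m => match h m with | some c => t + c | none => t) a
      = a + (l.map (fun m => match h m with | some c => c | none => 0)).sum := by
  have he : (fun t m => match h m with | some c => t + c | none => t)
      = (fun (t : Int) m => t + (match h m with | some c => c | none => 0)) := by
    funext t m; cases h m <;> simp
  rw [he, PySem.List.foldl_add]

-- ===== VERDICT (by name: the statement is the Claim_ definition above) =====
theorem getNumCases_spec : Claim_equal_getNumCases := by
  intro data counties months _ hPre
  obtain ⟨hdata, hlogs⟩ := hPre
  unfold Spec_getNumCases getNumCases getNumCases_alt
  have hfA : (fun (totalCases : Int) (cl : String × List (String × Int)) =>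
      if counties.contains cl.1 then
        cl.2.foldl (fun acc mc => if months.contains mc.1 then acc + mc.2 else acc) totalCases
      else totalCases)
      = (fun (totalCases : Int) cl =>
          if counties.contains cl.1 then
            totalCases + (cl.2.map (fun mc => if months.contains mc.1 then mc.2 else 0)).sum
          else totalCases) := by
    funext t cl
    have hinner := pv_foldl_if_add cl.2 (fun mc => months.contains mc.1) Prod.snd t
    by_cases hc : counties.contains cl.1 = true
    · rw [if_pos hc, if_pos hc]; exact hinner
    · rw [if_neg hc, if_neg hc]
  rw [hfA, pv_foldl_if_add data (fun cl => counties.contains cl.1)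
        (fun cl => (cl.2.map (fun mc => if months.contains mc.1 then mc.2 else 0)).sum) 0,
      zero_add]
  have hfB : (fun (total : Int) county =>
      match (PySem.Dict.mk data).get? county with
      | none => total
      | some log =>
        (PySem.Set.ofList months).foldl
          (fun t month => match (PySem.Dict.mk log).get? month with | some c => t + c | none => t) total)
      = (fun (total : Int) county => total +
          (match (PySem.Dict.mk data).get? county with
           | none => 0
           | some log => ((PySem.Set.ofList months).map
               (fun m => match (PySem.Dict.mk log).get? m with | some c => c | none => 0)).sum)) := by
    funext t county
    cases (PySem.Dict.mk data).get? county with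
    | none => simp
    | some log => simpa using pv_foldl_opt_add (PySem.Set.ofList months) (fun m => (PySem.Dict.mk log).get? m) t
  rw [hfB, PySem.List.foldl_add, zero_add]
  have hmapA : data.map (fun cl => if counties.contains cl.1 then
        (cl.2.map (fun mc => if months.contains mc.1 then mc.2 else 0)).sum else 0)
      = data.map (fun cl => if counties.contains cl.1 then
        ((PySem.Set.ofList months).map
          (fun m => match (PySem.Dict.mk cl.2).get? m with | some c => c | none => 0)).sum else 0) := by
    apply List.map_congr_left
    intro cl hcl
    have h := pv_assoc_sum cl.2 months (fun c => c) (hlogs cl hcl)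
    by_cases hc : counties.contains cl.1 = true
    · rw [if_pos hc, if_pos hc, h]
      apply congrArg List.sum
      apply List.map_congr_left
      intro m _
      cases (PySem.Dict.mk cl.2).get? m <;> rfl
    · rw [if_neg hc, if_neg hc]
  rw [hmapA]
  refine (pv_assoc_sum data counties
      (fun log => ((PySem.Set.ofList months).map
        (fun m => match (PySem.Dict.mk log).get? m with | some c => c | none => 0)).sum) hdata).trans ?_
  apply congrArg List.sum
  apply List.map_congr_left
  intro county _
  cases (PySem.Dict.mk data).get? county <;> rfl
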